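-- pv_equiv track=rewrite | github.com/amol-ship-it/agi-core | domains/arc/transformation_primitives.py | extend_right
-- ===== SOURCE A (Python) =====
-- Grid = list[list[int]]
--
-- def extend_right(grid: Grid) -> Grid:
--     """Each non-zero pixel extends rightward, filling zeros until hitting another non-zero."""
--     if not grid or not grid[0]:
--         return grid
--     h, w = len(grid), len(grid[0])
--     result = [row[:] for row in grid]
--     for r in range(h):
--         for c in range(1, w):
--             if result[r][c] == 0 and result[r][c - 1] != 0:
--                 result[r][c] = result[r][c - 1]
--     return result
-- ===== SOURCE B (Python) =====
-- def extend_right(grid):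
--     """Each non-zero pixel extends rightward, filling zeros until hitting another non-zero."""
--     if not grid or not grid[0]:
--         return grid
--     return [_fill_row(row) for row in grid]
--
--
-- def _fill_row(row):
--     """Leading zeros stay, then the rest of the row is a sequence of runs."""
--     k = next((i for i, v in enumerate(row) if v), None)
--     if k is None:
--         return row[:]
--     return [0] * k + _run_fill(row[k:])
--
--
-- def _run_fill(seg):
--     """seg[0] is non-zero: emit a run of it up to the next non-zero, then recurse."""
--     j = next((i for i in range(1, len(seg)) if seg[i]), None)
--     if j is None:
--         return [seg[0]] * len(seg)
--     return [seg[0]] * j + _run_fill(seg[j:])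
-- ===== Notes on version B (the rewrite author's own statement) =====
-- stated objective: alternative
-- what changed: B rebuilds each row from maximal runs: it finds the next non-zero index and emits the whole run by list replication, recursively, instead of A's nested per-cell loops that test and overwrite the previously written cell; Pre_ excludes non-rectangular grids, on which rows shorter than the first make A raise IndexError and A's leaving untouched everything beyond the first row's width is an accident of its implementation.
-- outside the precondition, e.g. on extend_right([[1, 0], [2, 0, 0]]): A returns [[1, 1], [2, 2, 0]], B returns [[1, 1], [2, 2, 2]]; on extend_right([[1], [2, 0]]): A returns [[1], [2, 0]], B returns [[1], [2, 2]]; on extend_right([[1, 0], [2]]): A raises IndexError, B returns [[1, 1], [2]]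
import Mathlib
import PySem

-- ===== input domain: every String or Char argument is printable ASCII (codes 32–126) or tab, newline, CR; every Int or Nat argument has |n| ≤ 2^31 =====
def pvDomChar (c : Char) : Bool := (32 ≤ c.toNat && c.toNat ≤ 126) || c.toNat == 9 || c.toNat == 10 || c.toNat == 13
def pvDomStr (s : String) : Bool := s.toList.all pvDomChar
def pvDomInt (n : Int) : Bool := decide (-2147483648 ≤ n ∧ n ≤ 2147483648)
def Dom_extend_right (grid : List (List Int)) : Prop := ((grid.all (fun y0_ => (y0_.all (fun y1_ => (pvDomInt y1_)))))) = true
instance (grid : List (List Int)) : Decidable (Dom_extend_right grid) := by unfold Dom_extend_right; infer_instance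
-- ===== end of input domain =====

-- B rebuilds each row from maximal runs (find the next non-zero, emit the run by replication,
-- recurse) instead of A's nested per-cell loops; objective: alternative. Return values only.

-- ===== PORT A =====
-- inner loop 'for c in range(1, w): if result[r][c] == 0 and result[r][c-1] != 0: result[r][c] = result[r][c-1]'
def fillRowA (w : Nat) (row : List Int) : List Int :=
  (PySem.List.pyRange 1 (w : Int) 1).foldl (fun res c =>
    match PySem.List.pyGet? res c, PySem.List.pyGet? res (c - 1) with
    | some a, some b => if a = 0 ∧ b ≠ 0 then res.set c.toNat b else res
    | _, _ => res) row   -- an out-of-range index is an IndexError in Python; excluded by Pre_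

def extend_right (grid : List (List Int)) : List (List Int) :=
  if grid = [] ∨ grid.headD [] = [] then grid
  else grid.map (fillRowA (grid.headD []).length)   -- 'result = [row[:] for row in grid]' then the r-loop mutates row r only

-- ===== PORT B =====
-- '_run_fill': seg[0] is non-zero; 'next((i for i in range(1, len(seg)) if seg[i]), None)'
-- → find? over range' 1 (len-1); all indices used are in range, so getD/headD are exact.
def runFill (seg : List Int) : List Int :=
  match hfind : (List.range' 1 (seg.length - 1)).find? (fun i => seg.getD i 0 != 0) with
  | none => List.replicate seg.length (seg.headD 0)              -- '[seg[0]] * len(seg)'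
  | some j => List.replicate j (seg.headD 0) ++ runFill (seg.drop j)
termination_by seg.length
decreasing_by
  have hm := List.mem_of_find?_eq_some hfind
  rw [List.mem_range'_1] at hm
  simp only [List.length_drop]
  omega

-- '_fill_row': 'next((i for i, v in enumerate(row) if v), None)' → find? over zipIdx
def fillRow (row : List Int) : List Int :=
  match (row.zipIdx.find? (fun p => p.1 != 0)).map (·.2) with
  | none => row                                                  -- 'row[:]'
  | some k => List.replicate k 0 ++ runFill (row.drop k)         -- '[0]*k + _run_fill(row[k:])'

def extend_right_alt (grid : List (List Int)) : List (List Int) :=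
  if grid = [] ∨ grid.headD [] = [] then grid   -- 'if not grid or not grid[0]: return grid'
  else grid.map fillRow

-- ===== PRECONDITION & SPEC =====
-- Pre_ excludes non-rectangular grids (when the first row is non-empty): rows shorter than the
-- first make A raise IndexError, and A's leaving untouched everything beyond the first row's
-- width on longer rows is an accident of its implementation.
def Pre_extend_right (grid : List (List Int)) : Prop :=
  grid.headD [] ≠ [] → ∀ row ∈ grid, row.length = (grid.headD []).length
instance (grid : List (List Int)) : Decidable (Pre_extend_right grid) := by
  unfold Pre_extend_right; infer_instance
def pvWitness_extend_right : List (List Int) := [[1, 0, 0], [0, 2, 0]]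

def Spec_extend_right (grid : List (List Int)) (out : List (List Int)) : Prop := out = extend_right_alt grid
instance (grid : List (List Int)) (out : List (List Int)) : Decidable (Spec_extend_right grid out) := by unfold Spec_extend_right; infer_instance

-- ===== CLAIM (what is proved, stated in full; the proofs are below) =====
def Claim_equal_extend_right : Prop := ∀ (grid : List (List Int)), Dom_extend_right grid → Pre_extend_right grid → Spec_extend_right grid (extend_right grid)

-- ===== LEMMAS AND PROOFS =====

-- reference recursion: the intended per-row fill
def fill (carry : Int) : List Int → List Int
  | [] => []
  | x :: xs => (if x ≠ 0 then x else carry) :: fill (if x ≠ 0 then x else carry) xs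

def carryAfter (c : Int) (xs : List Int) : Int :=
  xs.foldl (fun a x => if x ≠ 0 then x else a) c

theorem fill_length (c : Int) (xs : List Int) : (fill c xs).length = xs.length := by
  induction xs generalizing c with
  | nil => rfl
  | cons x xs ih => simp [fill, ih]

theorem fill_append_singleton (c : Int) (xs : List Int) (x : Int) :
    fill c (xs ++ [x]) = fill c xs ++ [if x ≠ 0 then x else carryAfter c xs] := by
  induction xs generalizing c with
  | nil => simp [fill, carryAfter]
  | cons y ys ih => simp [fill, ih, carryAfter, List.foldl_cons]

theorem fill_getLast? (c : Int) (xs : List Int) (h : xs ≠ []) :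
    (fill c xs).getLast? = some (carryAfter c xs) := by
  induction xs generalizing c with
  | nil => exact absurd rfl h
  | cons y ys ih =>
    cases ys with
    | nil => simp [fill, carryAfter]
    | cons z zs =>
      have := ih (c := if y ≠ 0 then y else c) (by simp)
      simp [fill] at this ⊢
      simpa [carryAfter, List.foldl_cons] using this

-- A's index loop over range(1, k) keeps the invariant 'prefix filled, suffix untouched'
theorem fillA_invariant (row : List Int) (k : Nat) (h1 : 1 ≤ k) (h2 : k ≤ row.length) :
    fillRowA k row = fill 0 (row.take k) ++ row.drop k := by
  unfold fillRowA
  induction k with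
  | zero => omega
  | succ k ih =>
    rcases Nat.lt_or_ge 1 (k + 1) with hk | hk
    · -- k ≥ 1 : peel the last index k from the range
      have hk1 : 1 ≤ k := by omega
      have hkl : k < row.length := by omega
      have hrange : PySem.List.pyRange 1 ((k + 1 : Nat) : Int) 1
          = PySem.List.pyRange 1 (k : Int) 1 ++ [(k : Int)] := by
        have := PySem.List.pyRange_one_succ_right (a := 1) (b := (k : Int)) (by exact_mod_cast hk1)
        push_cast
        simpa using this
      rw [hrange, List.foldl_append]
      have ihe := ih hk1 (by omega)
      unfold fillRowA at ihe
      rw [ihe]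
      set pre := fill 0 (row.take k) with hpre
      have hprelen : pre.length = k := by
        simp [hpre, fill_length, List.length_take, Nat.min_eq_left (le_of_lt hkl)]
      -- res[k] is the head of the untouched suffix
      obtain ⟨y, ys, hdrop⟩ : ∃ y ys, row.drop k = y :: ys :=
        List.exists_cons_of_ne_nil (by simp [List.drop_eq_nil_iff]; omega)
      have hy : row[k]? = some y := by
        have := congrArg (fun l => l[0]?) hdrop
        simpa [List.getElem?_drop] using this
      have hgetk : PySem.List.pyGet? (pre ++ row.drop k) (k : Int) = some y := by
        rw [hdrop, ← hprelen]
        exact_mod_cast PySem.List.pyGet?_append_length (pre := pre) (y := y) (ys := ys)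
      -- res[k-1] is the last element of the filled prefix
      have htkne : row.take k ≠ [] := by
        rw [Ne, List.take_eq_nil_iff]
        rintro (h | h)
        · omega
        · rw [h] at hkl; simp at hkl
      have hlast : pre.getLast? = some (carryAfter 0 (row.take k)) :=
        fill_getLast? 0 (row.take k) htkne
      have hgetk1 : PySem.List.pyGet? (pre ++ row.drop k) ((k : Int) - 1)
          = some (carryAfter 0 (row.take k)) := by
        have hidx : ((k : Int) - 1) = ((pre.length - 1 : Nat) : Int) := by
          rw [hprelen]; omega
        rw [hidx, PySem.List.pyGet?_natCast, List.getElem?_append_left (by rw [hprelen]; omega)]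
        rw [← List.getLast?_eq_getElem?]
        exact hlast
      have hdrop1 : row.drop (k + 1) = ys := by
        have : row.drop (k + 1) = (row.drop k).tail := by
          rw [← List.drop_drop]; simp
        rw [this, hdrop]; rfl
      have htake1 : row.take (k + 1) = row.take k ++ [y] := by
        rw [List.take_add_one, hy]; rfl
      have hset : ∀ v : Int, (pre ++ row.drop k).set k v = pre ++ v :: ys := by
        intro v
        rw [hdrop, ← hprelen, List.set_append_right _ _ le_rfl]
        simp
      simp only [List.foldl_cons, List.foldl_nil]
      rw [hgetk, hgetk1]
      rw [htake1, fill_append_singleton, ← hpre, hdrop1]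
      simp only [Int.toNat_natCast]
      by_cases hy0 : y = 0
      · by_cases hv : carryAfter 0 (row.take k) = 0
        · simp [hy0, hv, hdrop]
        · simp only [hy0, hv, ne_eq, not_false_iff, and_self, if_true, hset]
          simp
      · simp [hy0, hdrop]
    · -- k + 1 = 1 : empty range, and fill leaves row[0] alone
      have hk0 : k = 0 := by omega
      subst hk0
      have hnil : PySem.List.pyRange 1 ((0 + 1 : Nat) : Int) 1 = [] := by
        apply PySem.List.pyRange_one_eq_nil; norm_num
      rw [hnil]
      obtain ⟨y, ys, hrow⟩ : ∃ y ys, row = y :: ys :=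
        List.exists_cons_of_ne_nil (by intro h; rw [h] at h2; simp at h2)
      subst hrow
      by_cases hy : y = 0 <;> simp [fill, hy]

-- B-side lemmas
theorem fill_replicate_append (c : Int) (k : Nat) (ys : List Int) :
    fill c (List.replicate k 0 ++ ys) = List.replicate k c ++ fill c ys := by
  induction k with
  | zero => simp
  | succ n ih => simp [List.replicate_succ, fill, ih]

theorem fill_head_ne (c x : Int) (xs : List Int) (hx : x ≠ 0) :
    fill c (x :: xs) = fill 0 (x :: xs) := by
  simp [fill, hx]

theorem fill_all_zero (row : List Int) (h : ∀ x ∈ row, x = 0) : fill 0 row = row := by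
  induction row with
  | nil => rfl
  | cons x xs ih =>
    have hx : x = 0 := h x (by simp)
    simp [fill, hx, ih (fun y hy => h y (by simp [hy]))]

theorem find?_range'_first (p : Nat → Bool) :
    ∀ (n s j : Nat), (List.range' s n).find? p = some j →
      p j = true ∧ s ≤ j ∧ j < s + n ∧ ∀ i, s ≤ i → i < j → p i = false := by
  intro n
  induction n with
  | zero => intro s j h; simp at h
  | succ n ih =>
    intro s j h
    rw [List.range'_succ, List.find?_cons] at h
    by_cases hp : p s
    · rw [hp] at h
      simp only [Option.some.injEq] at h
      subst h
      exact ⟨hp, le_rfl, by omega, fun i h1 h2 => by omega⟩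
    · rw [Bool.not_eq_true] at hp
      rw [hp] at h
      obtain ⟨h1, h2, h3, h4⟩ := ih (s + 1) j h
      refine ⟨h1, by omega, by omega, fun i hi1 hi2 => ?_⟩
      rcases Nat.eq_or_lt_of_le hi1 with he | hl
      · simpa [← he] using hp
      · exact h4 i hl hi2

theorem find?_zipIdx_first :
    ∀ (row : List Int) (s : Nat) (v : Int) (k : Nat),
      (row.zipIdx s).find? (fun p => p.1 != 0) = some (v, k) →
      s ≤ k ∧ row[k - s]? = some v ∧ v ≠ 0 ∧ ∀ i < k - s, row[i]? = some (0 : Int) := by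
  intro row
  induction row with
  | nil => intro s v k h; simp at h
  | cons x xs ih =>
    intro s v k h
    rw [List.zipIdx_cons, List.find?_cons] at h
    by_cases hx : x = 0
    · rw [show ((x, s).1 != 0) = false by simp [hx]] at h
      obtain ⟨h1, h2, h3, h4⟩ := ih (s + 1) v k h
      refine ⟨by omega, ?_, h3, ?_⟩
      · have : k - s = (k - (s + 1)) + 1 := by omega
        rw [this]; simpa using h2
      · intro i hi
        cases i with
        | zero => simp [hx]
        | succ m =>
          have : m < k - (s + 1) := by omega
          simpa using h4 m this
    · rw [show ((x, s).1 != 0) = true by simp [hx]] at h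
      simp only [Option.some.injEq, Prod.mk.injEq] at h
      obtain ⟨hv, hk⟩ := h
      subst hv; subst hk
      exact ⟨le_rfl, by simp, hx, fun i hi => by omega⟩

theorem runFill_eq : ∀ (n : Nat) (seg : List Int), seg.length ≤ n →
    seg.headD 0 ≠ 0 → runFill seg = fill 0 seg := by
  intro n
  induction n with
  | zero =>
    intro seg hl hh
    cases seg with
    | nil => simp at hh
    | cons x xs => simp at hl
  | succ n ih =>
    intro seg hl hh
    cases seg with
    | nil => simp at hh
    | cons v t =>
      have hv : v ≠ 0 := by simpa using hh
      rw [runFill]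
      cases hf : (List.range' 1 ((v :: t).length - 1)).find? (fun i => (v :: t).getD i 0 != 0) with
      | none =>
        -- every later entry is zero
        rw [List.find?_eq_none] at hf
        have ht : ∀ x ∈ t, x = (0 : Int) := by
          intro x hx
          obtain ⟨m, hm, hxm⟩ := List.mem_iff_getElem.1 hx
          have hmem : (1 + m) ∈ List.range' 1 ((v :: t).length - 1) := by
            rw [List.mem_range'_1]; simp; omega
          have h5 := hf _ hmem
          have hg : (v :: t).getD (1 + m) 0 = t[m] := by
            rw [List.getD_eq_getElem _ _ (by simp; omega)]
            simp [Nat.add_comm 1 m]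
          rw [hg] at h5
          simp at h5
          rw [← hxm]; exact h5
        have htr : t = List.replicate t.length 0 := List.eq_replicate_of_mem ht
        simp only [List.headD_cons, List.length_cons]
        rw [List.replicate_succ]
        rw [show fill 0 (v :: t) = v :: fill v t from by simp [fill, hv]]
        conv_rhs => rw [htr]
        have h6 := fill_replicate_append v t.length []
        simp [fill] at h6
        rw [h6]
      | some j =>
        obtain ⟨hpj, hj1, hj2, hfirst⟩ := find?_range'_first _ _ _ _ hf
        have hl' : t.length + 1 ≤ n + 1 := by simpa using hl
        have hj2' : j ≤ t.length := by simp at hj2; omega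
        have hjlen : j < (v :: t).length := by simp; omega
        have hsegj : (v :: t)[j] ≠ 0 := by
          rw [List.getD_eq_getElem _ _ hjlen] at hpj
          simpa using hpj
        -- the prefix up to j is v followed by zeros
        have htake : (v :: t).take j = v :: List.replicate (j - 1) 0 := by
          apply List.ext_getElem
          · simp; omega
          · intro i h1 h2
            have hij : i < j := by
              simp at h1; omega
            rw [List.getElem_take]
            match i with
            | 0 => simp
            | Nat.succ m =>
              have hz := hfirst (m + 1) (by omega) hij
              rw [List.getD_eq_getElem _ _ (by omega)] at hz
              have hz' : (v :: t)[m + 1] = 0 := by simpa using hz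
              simp only [List.getElem_cons_succ] at hz' ⊢
              rw [hz']
              rw [List.getElem_replicate]
        obtain ⟨w, ws, hdrop⟩ : ∃ w ws, (v :: t).drop j = w :: ws :=
          List.exists_cons_of_ne_nil (by simp [List.drop_eq_nil_iff]; omega)
        have hw : w = (v :: t)[j] := by
          have h5 := congrArg List.head? hdrop
          rw [List.head?_drop, List.getElem?_eq_getElem hjlen] at h5
          simp at h5
          exact h5.symm
        have hcalc : fill 0 (v :: t) = List.replicate j v ++ fill v ((v :: t).drop j) := by
          conv_lhs => rw [← List.take_append_drop j (v :: t), htake]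
          rw [show ((v : Int) :: List.replicate (j - 1) 0 ++ (v :: t).drop j)
                = v :: (List.replicate (j - 1) 0 ++ (v :: t).drop j) from rfl]
          rw [show fill 0 (v :: (List.replicate (j - 1) 0 ++ (v :: t).drop j))
                = v :: fill v (List.replicate (j - 1) 0 ++ (v :: t).drop j) from by
              simp [fill, hv]]
          rw [fill_replicate_append]
          rw [show List.replicate j v = v :: List.replicate (j - 1) v from by
              rw [← List.replicate_succ]; congr 1; omega]
          simp
        rw [hcalc]
        have hIH : runFill ((v :: t).drop j) = fill 0 ((v :: t).drop j) := by
          apply ih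
          · simp; omega
          · rw [hdrop]; simp only [List.headD_cons]; rw [hw]; exact hsegj
        simp only [List.headD_cons]
        rw [hIH, hdrop, fill_head_ne v w ws (by rw [hw]; exact hsegj)]

theorem fillRow_eq (row : List Int) : fillRow row = fill 0 row := by
  unfold fillRow
  cases hf : row.zipIdx.find? (fun p => p.1 != 0) with
  | none =>
    rw [List.find?_eq_none] at hf
    simp only [Option.map_none]
    have hz : ∀ x ∈ row, x = (0 : Int) := by
      intro x hx
      obtain ⟨i, hi, hxi⟩ := List.mem_iff_getElem.1 hx
      have hmem : (x, i) ∈ row.zipIdx := by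
        rw [List.mem_iff_getElem]
        exact ⟨i, by simpa using hi, by rw [List.getElem_zipIdx]; simp [hxi]⟩
      have := hf _ hmem
      simpa using this
    rw [fill_all_zero row hz]
  | some p =>
    obtain ⟨v, k⟩ := p
    obtain ⟨-, hk, hv, hzero⟩ := find?_zipIdx_first row 0 v k hf
    simp only [Nat.sub_zero] at hk hzero
    have hklen : k < row.length := by
      by_contra hc
      rw [List.getElem?_eq_none (by omega)] at hk
      simp at hk
    have hrk : row[k] = v := by
      rw [List.getElem?_eq_getElem hklen] at hk
      simpa using hk
    have htake : row.take k = List.replicate k 0 := by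
      apply List.ext_getElem
      · simp [Nat.min_eq_left (le_of_lt hklen)]
      · intro i h1 h2
        have hik : i < k := by
          simp [Nat.min_eq_left (le_of_lt hklen)] at h1; omega
        have := hzero i hik
        rw [List.getElem?_eq_getElem (by omega)] at this
        simp at this
        rw [List.getElem_take, this, List.getElem_replicate]
    have hcalc : fill 0 row = List.replicate k 0 ++ fill 0 (row.drop k) := by
      conv_lhs => rw [← List.take_append_drop k row, htake]
      exact fill_replicate_append 0 k (row.drop k)
    have hIH : runFill (row.drop k) = fill 0 (row.drop k) := by
      apply runFill_eq (row.drop k).length _ le_rfl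
      rw [List.headD_eq_head?, List.head?_drop, hk]
      simpa using hv
    simp only [Option.map_some]
    rw [hIH, hcalc]

-- ===== VERDICT (by name: the statement is the Claim_ definition above) =====
theorem extend_right_spec : Claim_equal_extend_right := by
  intro grid _ hpre
  unfold Spec_extend_right extend_right extend_right_alt
  by_cases hg : grid = [] ∨ grid.headD [] = []
  · rw [if_pos hg, if_pos hg]
  · rw [if_neg hg, if_neg hg]
    rw [not_or] at hg
    apply List.map_congr_left
    intro row hrow
    have hlen : row.length = (grid.headD []).length := hpre hg.2 row hrow
    have hw1 : 1 ≤ (grid.headD []).length := by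
      cases hhd : grid.headD [] with
      | nil => exact absurd hhd hg.2
      | cons a l => simp
    rw [fillA_invariant row (grid.headD []).length hw1 (by omega)]
    rw [← hlen, List.take_length, List.drop_length, List.append_nil, fillRow_eq]
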